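-- pv_equiv track=rewrite | github.com/a2006ly/sys-programming | Lesson3.py | fix_first
-- ===== SOURCE A (Python) =====
-- def fix_first(s):
--     f = ""
--     for i in range(len(s)):
--         if i != 0 and s[0] == s[i] :
--             f = f+"*"
--         else:
--             f = f+s[i]
--     return f
-- ===== SOURCE B (Python) =====
-- def fix_first(s):
--     if not s:
--         return ""
--     return s[0] + s[1:].replace(s[0], "*")
-- ===== Notes on version B (the rewrite author's own statement) =====
-- stated objective: idiomatic
-- what changed: Replaced A's index-by-index accumulation loop with a slice-plus-str.replace decomposition: keep the first character and replace its occurrences in the rest with '*' via the library call.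
import Mathlib
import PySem

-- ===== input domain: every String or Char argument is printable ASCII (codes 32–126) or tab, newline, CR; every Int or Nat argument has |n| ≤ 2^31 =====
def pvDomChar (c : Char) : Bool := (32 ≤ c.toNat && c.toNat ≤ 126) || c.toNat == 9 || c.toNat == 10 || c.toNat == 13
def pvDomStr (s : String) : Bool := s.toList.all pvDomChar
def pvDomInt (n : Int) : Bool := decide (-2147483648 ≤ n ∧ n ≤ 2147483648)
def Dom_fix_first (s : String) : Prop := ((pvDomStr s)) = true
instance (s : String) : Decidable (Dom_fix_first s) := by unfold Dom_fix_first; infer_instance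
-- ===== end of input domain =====

-- B replaces A's index-by-index accumulation loop with slice + str.replace (idiomatic).

-- ===== PORT A =====
-- for i in range(len(s)): if i != 0 and s[0] == s[i]: f = f+"*" else: f = f+s[i]
def fix_first (s : String) : String :=
  String.mk ((PySem.List.pyRange 0 (PySem.Chars.len s.toList : Int)).foldl
    (fun f i =>
      if i ≠ 0 ∧ PySem.List.pyGet? s.toList 0 = PySem.List.pyGet? s.toList i
      then f ++ ['*']
      else f ++ (PySem.List.pyGet? s.toList i).toList) [])

-- ===== PORT B =====
-- if not s: return "";  return s[0] + s[1:].replace(s[0], "*")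
def fix_first_alt (s : String) : String :=
  match s.toList with
  | [] => ""
  | h :: _ =>
    String.mk (h :: PySem.Chars.replace (PySem.List.slice s.toList (some 1) none) [h] ['*'])

-- ===== PRECONDITION & SPEC =====
def Spec_fix_first (s : String) (out : String) : Prop := out = fix_first_alt s
instance (s : String) (out : String) : Decidable (Spec_fix_first s out) := by unfold Spec_fix_first; infer_instance

-- ===== CLAIM (what is proved, stated in full; the proofs are below) =====
def Claim_equal_fix_first : Prop := ∀ (s : String), Dom_fix_first s → Spec_fix_first s (fix_first s)

-- ===== LEMMAS AND PROOFS =====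

-- replace with a single-char pattern and single-char replacement is a character map
lemma replace_go_single (a : Char) :
    ∀ (fuel : Nat) (l acc : List Char), l.length ≤ fuel →
      PySem.Chars.replace.go [a] ['*'] fuel l acc
        = acc.reverse ++ l.map (fun c => if c = a then '*' else c) := by
  intro fuel
  induction fuel with
  | zero =>
    intro l acc hl
    cases l with
    | nil => simp [PySem.Chars.replace.go]
    | cons c t => simp at hl
  | succ n ih =>
    intro l acc hl
    cases l with
    | nil => simp [PySem.Chars.replace.go]
    | cons c t =>
      by_cases hc : c = a
      · have hpre : List.isPrefixOf [a] (c :: t) = true := by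
          simp [List.isPrefixOf, hc]
        simp only [PySem.Chars.replace.go, hpre, if_pos]
        rw [show List.drop (List.length [a]) (c :: t) = t from rfl, ih t (['*'].reverse ++ acc) (by simpa using Nat.le_of_succ_le_succ hl)]
        simp [hc]
      · have hpre : List.isPrefixOf [a] (c :: t) = false := by
          simp [List.isPrefixOf]; intro h; exact absurd h.symm hc
        simp only [PySem.Chars.replace.go, hpre]
        rw [ih t (c :: acc) (by simpa using Nat.le_of_succ_le_succ hl)]
        simp [hc]

lemma replace_single (a : Char) (l : List Char) :
    PySem.Chars.replace l [a] ['*'] = l.map (fun c => if c = a then '*' else c) := by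
  unfold PySem.Chars.replace
  rw [if_neg (by simp)]
  simpa using replace_go_single a l.length l [] le_rfl

-- A's loop over the tail indices, as a flatMap over Nat range
lemma tail_flatMap (h : Char) :
    ∀ t : List Char,
      List.flatMap (fun i : Nat => if some h = t[i]? then ['*'] else (t[i]?).toList)
          (List.range t.length)
        = t.map (fun c => if c = h then '*' else c) := by
  intro t
  induction t with
  | nil => simp
  | cons x t' ih =>
    rw [List.length_cons, List.range_succ_eq_map, List.flatMap_cons, List.flatMap_map]
    by_cases hx : x = h
    · simp only [hx, List.getElem?_cons_zero, List.getElem?_cons_succ, if_pos rfl]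
      simp [ih]
    · have : (some h = some x) = False := by
        simp; exact fun e => hx e.symm
      simp only [List.getElem?_cons_zero, List.getElem?_cons_succ, this, if_false]
      simp [ih, hx]

-- A's whole loop on a nonempty character list
lemma foldA (h : Char) (t : List Char) :
    ((PySem.List.pyRange 0 (PySem.Chars.len (h :: t) : Int)).foldl
      (fun f i =>
        if i ≠ 0 ∧ PySem.List.pyGet? (h :: t) 0 = PySem.List.pyGet? (h :: t) i
        then f ++ ['*']
        else f ++ (PySem.List.pyGet? (h :: t) i).toList) [])
      = h :: t.map (fun c => if c = h then '*' else c) := by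
  have hbody :
      List.foldl (fun f i =>
        if i ≠ 0 ∧ PySem.List.pyGet? (h :: t) 0 = PySem.List.pyGet? (h :: t) i
        then f ++ ['*']
        else f ++ (PySem.List.pyGet? (h :: t) i).toList) ([] : List Char)
        (PySem.List.pyRange 0 (PySem.Chars.len (h :: t) : Int))
      = List.foldl (fun f i => f ++
          (if i ≠ 0 ∧ PySem.List.pyGet? (h :: t) 0 = PySem.List.pyGet? (h :: t) i
           then ['*'] else (PySem.List.pyGet? (h :: t) i).toList)) []
          (PySem.List.pyRange 0 (PySem.Chars.len (h :: t) : Int)) := by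
    apply PySem.List.foldl_congr_mem
    intro acc x _
    split <;> rfl
  rw [hbody, PySem.List.foldl_append_eq_flatMap]
  have hlen : (PySem.Chars.len (h :: t) : Int) = ((t.length + 1 : Nat) : Int) := by
    simp [PySem.Chars.len_eq]
  rw [hlen, PySem.List.pyRange_zero_natCast, List.flatMap_map]
  rw [List.range_succ_eq_map, List.flatMap_cons, List.flatMap_map]
  have h0 : (((0 : Nat) : Int) ≠ 0 ∧
      PySem.List.pyGet? (h :: t) 0 = PySem.List.pyGet? (h :: t) ((0 : Nat) : Int)) = False := by
    simp
  simp only [h0, if_false]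
  have hg : ∀ i : Nat,
      (if ((i + 1 : Nat) : Int) ≠ 0 ∧
          PySem.List.pyGet? (h :: t) 0 = PySem.List.pyGet? (h :: t) ((i + 1 : Nat) : Int)
       then ['*'] else (PySem.List.pyGet? (h :: t) ((i + 1 : Nat) : Int)).toList)
      = (if some h = t[i]? then ['*'] else (t[i]?).toList) := by
    intro i
    have h1 : PySem.List.pyGet? (h :: t) ((i + 1 : Nat) : Int) = t[i]? := by
      rw [PySem.List.pyGet?_natCast]
      simp
    have h2 : PySem.List.pyGet? (h :: t) 0 = some h := by
      simp [PySem.List.pyGet?_zero_cons]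
    rw [h1, h2]
    have h3 : ¬((i : Int) + 1 = 0) := by omega
    simp [h3]
  simp only [hg]
  have h4 : PySem.List.pyGet? (h :: t) ((0 : Nat) : Int) = some h := by
    simp [PySem.List.pyGet?_zero_cons]
  rw [h4]
  simp only [Option.toList_some, List.singleton_append]
  rw [tail_flatMap h t]
  rfl

-- ===== VERDICT (by name: the statement is the Claim_ definition above) =====
theorem fix_first_spec : Claim_equal_fix_first := by
  intro s _
  unfold Spec_fix_first fix_first fix_first_alt
  cases hs : s.toList with
  | nil => simp [PySem.Chars.len_eq, PySem.List.pyRange]; rfl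
  | cons h t =>
    rw [foldA h t]
    have hslice : PySem.List.slice (h :: t) (some 1) none = t := by
      rw [PySem.List.slice_from (h :: t) (by norm_num : (0:Int) ≤ 1)]
      simp
    rw [hslice]
    show _ = String.mk (h :: PySem.Chars.replace t [h] ['*'])
    rw [replace_single h t]
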